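-- pv_equiv track=rewrite | github.com/attilagyurman/anenji-local-modbus | anenji2mqtt.py | group_registers
-- ===== SOURCE A (Python) =====
-- def group_registers(registers, max_gap=20, max_batch=50):
-- 	"""Group sorted registers into Modbus batches.
--
-- 	Two registers land in the same batch when:
-- 	  - the gap to the previous register <= max_gap, AND
-- 	  - the span from the first to the last register in the group <= max_batch.
--
-- 	Setting max_gap=0 effectively gives individual per-register queries
-- 	(same behaviour as the original single-register loop).
--
-- 	Returns a list of groups, each being a list of register dicts.
-- 	"""
-- 	if not registers:
-- 		return []
-- 	sorted_regs = sorted(registers, key=lambda r: r['register'])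
-- 	groups = []
-- 	current_group = [sorted_regs[0]]
-- 	for reg in sorted_regs[1:]:
-- 		prev_addr = current_group[-1]['register']
-- 		curr_addr = reg['register']
-- 		span = curr_addr - current_group[0]['register'] + 1
-- 		if (curr_addr - prev_addr <= max_gap) and (span <= max_batch):
-- 			current_group.append(reg)
-- 		else:
-- 			groups.append(current_group)
-- 			current_group = [reg]
-- 	groups.append(current_group)
-- 	return groups
-- ===== SOURCE B (Python) =====
-- def _take_group(start, prev, rest, max_gap, max_batch):
--     """Longest prefix of rest that extends a group beginning at address
--     start whose last taken address is prev; returns (prefix, remainder)."""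
--     grp = []
--     for idx, r in enumerate(rest):
--         a = r['register']
--         if a - prev > max_gap or a - start + 1 > max_batch:
--             return grp, rest[idx:]
--         grp.append(r)
--         prev = a
--     return grp, []
--
--
-- def group_registers(registers, max_gap=20, max_batch=50):
--     srt = sorted(registers, key=lambda r: r['register'])
--     out = []
--     while srt:
--         head, rest = srt[0], srt[1:]
--         grp, srt = _take_group(head['register'], head['register'], rest,
--                                max_gap, max_batch)
--         out.append([head] + grp)
--     return out
-- ===== Notes on version B (the rewrite author's own statement) =====
-- stated objective: alternative
-- what changed: Replaces A's single fold carrying a live (groups, current_group) accumulator with a per-group decomposition: an outer loop that repeatedly cuts off one whole batch via a _take_group helper (longest admissible prefix) and then continues on the remainder.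
import Mathlib
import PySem

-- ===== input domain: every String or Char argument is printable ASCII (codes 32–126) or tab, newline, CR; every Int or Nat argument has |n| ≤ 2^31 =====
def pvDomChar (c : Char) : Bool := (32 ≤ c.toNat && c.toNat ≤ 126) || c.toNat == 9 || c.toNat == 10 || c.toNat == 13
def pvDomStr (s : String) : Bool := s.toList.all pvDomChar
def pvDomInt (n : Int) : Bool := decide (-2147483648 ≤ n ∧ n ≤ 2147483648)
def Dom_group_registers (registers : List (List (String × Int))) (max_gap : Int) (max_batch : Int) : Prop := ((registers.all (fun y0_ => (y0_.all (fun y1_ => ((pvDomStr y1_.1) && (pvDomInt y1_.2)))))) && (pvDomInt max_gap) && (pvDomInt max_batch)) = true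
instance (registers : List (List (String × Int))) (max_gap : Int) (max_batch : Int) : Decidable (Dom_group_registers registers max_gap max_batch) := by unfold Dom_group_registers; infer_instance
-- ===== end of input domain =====

-- B replaces A's single fold with a (groups, current_group) accumulator by a per-group
-- decomposition: cut off one whole batch (longest admissible prefix) and continue on the rest.
-- Equivalence is about the return value only; neither program mutates its argument.

-- r['register'] with first-match lookup (KeyError excluded by Pre_; default 0 never observed there)
def pvKey (r : List (String × Int)) : Int := (List.lookup "register" r).getD 0

-- ===== PORT A =====
def group_registers (registers : List (List (String × Int))) (max_gap : Int) (max_batch : Int) : List (List (List (String × Int))) :=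
  if registers.isEmpty then []
  else
    let sorted_regs := PySem.List.sorted registers (fun r => pvKey r) false
    let current_group : List (List (String × Int)) := [(PySem.List.pyGet? sorted_regs 0).getD []]
    let st := (PySem.List.slice sorted_regs (some 1) none).foldl
      (fun (st : List (List (List (String × Int))) × List (List (String × Int))) reg =>
        let prev_addr := pvKey (PySem.List.pyGetD st.2 (-1) [])
        let curr_addr := pvKey reg
        let span := curr_addr - pvKey (PySem.List.pyGetD st.2 0 []) + 1
        if curr_addr - prev_addr ≤ max_gap ∧ span ≤ max_batch then
          (st.1, st.2 ++ [reg])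
        else
          (st.1 ++ [st.2], [reg]))
      ([], current_group)
    st.1 ++ [st.2]

-- ===== PORT B =====
def pvTakeGroup (max_gap max_batch start : Int) : Int → List (List (String × Int)) → List (List (String × Int)) × List (List (String × Int))
  | _, [] => ([], [])
  | prev, r :: tl =>
    let a := pvKey r
    if a - prev > max_gap ∨ a - start + 1 > max_batch then ([], r :: tl)
    else
      let p := pvTakeGroup max_gap max_batch start a tl
      (r :: p.1, p.2)

theorem pvTakeGroup_snd_length (mg mb start : Int) : ∀ (prev : Int) (l : List (List (String × Int))), (pvTakeGroup mg mb start prev l).2.length ≤ l.length := by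
  intro prev l
  induction l generalizing prev with
  | nil => simp [pvTakeGroup]
  | cons r tl ih =>
    simp only [pvTakeGroup]
    split
    · simp
    · exact le_trans (ih _) (Nat.le_succ _)

def pvChunks (max_gap max_batch : Int) : List (List (String × Int)) → List (List (List (String × Int)))
  | [] => []
  | r :: tl =>
    let s := pvKey r
    let p := pvTakeGroup max_gap max_batch s s tl
    (r :: p.1) :: pvChunks max_gap max_batch p.2
termination_by l => l.length
decreasing_by
  exact Nat.lt_succ_of_le (pvTakeGroup_snd_length _ _ _ _ _)

def group_registers_alt (registers : List (List (String × Int))) (max_gap : Int) (max_batch : Int) : List (List (List (String × Int))) :=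
  pvChunks max_gap max_batch (PySem.List.sorted registers (fun r => pvKey r) false)

-- ===== PRECONDITION & SPEC =====
-- Pre_ excludes exactly the inputs where Python A raises KeyError: a register dict without the 'register' key.
def Pre_group_registers (registers : List (List (String × Int))) (max_gap : Int) (max_batch : Int) : Prop :=
  ∀ r ∈ registers, (List.lookup "register" r).isSome = true
instance (registers : List (List (String × Int))) (max_gap : Int) (max_batch : Int) : Decidable (Pre_group_registers registers max_gap max_batch) := by unfold Pre_group_registers; infer_instance

def pvWitness_group_registers : (List (List (String × Int))) × Int × Int :=
  ([[("register", 1), ("scale", 10)], [("register", 30)], [("register", 2)]], 20, 50)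

def Spec_group_registers (registers : List (List (String × Int))) (max_gap : Int) (max_batch : Int) (out : List (List (List (String × Int)))) : Prop := out = group_registers_alt registers max_gap max_batch
instance (registers : List (List (String × Int))) (max_gap : Int) (max_batch : Int) (out : List (List (List (String × Int)))) : Decidable (Spec_group_registers registers max_gap max_batch out) := by unfold Spec_group_registers; infer_instance

-- ===== CLAIM (what is proved, stated in full; the proofs are below) =====
def Claim_equal_group_registers : Prop := ∀ (registers : List (List (String × Int))) (max_gap : Int) (max_batch : Int), Dom_group_registers registers max_gap max_batch → Pre_group_registers registers max_gap max_batch → Spec_group_registers registers max_gap max_batch (group_registers registers max_gap max_batch)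

-- ===== LEMMAS AND PROOFS =====

-- A's loop over l, continuing the open group c :: cs with groups already emitted, equals
-- groups ++ (the B-side chunks that start by finishing that open group).
theorem loopA_eq (max_gap max_batch : Int) :
    ∀ (l : List (List (String × Int))) (groups : List (List (List (String × Int)))) (c : List (String × Int)) (cs : List (List (String × Int))),
      (let st := l.foldl
        (fun (st : List (List (List (String × Int))) × List (List (String × Int))) reg =>
          let prev_addr := pvKey (PySem.List.pyGetD st.2 (-1) [])
          let curr_addr := pvKey reg
          let span := curr_addr - pvKey (PySem.List.pyGetD st.2 0 []) + 1
          if curr_addr - prev_addr ≤ max_gap ∧ span ≤ max_batch then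
            (st.1, st.2 ++ [reg])
          else
            (st.1 ++ [st.2], [reg]))
        (groups, c :: cs)
       st.1 ++ [st.2])
      = groups ++
        (let p := pvTakeGroup max_gap max_batch (pvKey c) (pvKey ((c :: cs).getLast (List.cons_ne_nil c cs))) l
         ((c :: cs) ++ p.1) :: pvChunks max_gap max_batch p.2) := by
  intro l
  induction l with
  | nil =>
    intro groups c cs
    simp [pvTakeGroup, pvChunks]
  | cons r tl ih =>
    intro groups c cs
    simp only [List.foldl_cons]
    have hlast : PySem.List.pyGetD (c :: cs) (-1) ([] : List (String × Int)) = (c :: cs).getLast (List.cons_ne_nil c cs) :=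
      PySem.List.pyGetD_neg_one (c :: cs) ([]) (List.cons_ne_nil c cs)
    have hhead : PySem.List.pyGetD (c :: cs) 0 ([] : List (String × Int)) = c :=
      PySem.List.pyGetD_zero_cons c cs ([] : List (String × Int))
    by_cases hcond : pvKey r - pvKey ((c :: cs).getLast (List.cons_ne_nil c cs)) ≤ max_gap ∧ pvKey r - pvKey c + 1 ≤ max_batch
    · -- extend the open group
      have hif : (if pvKey r - pvKey (PySem.List.pyGetD (c :: cs) (-1) []) ≤ max_gap ∧
            pvKey r - pvKey (PySem.List.pyGetD (c :: cs) 0 []) + 1 ≤ max_batch then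
            (groups, (c :: cs) ++ [r]) else (groups ++ [c :: cs], [r]))
          = (groups, (c :: cs) ++ [r]) := by
        rw [hlast, hhead]; exact if_pos hcond
      simp only [hif]
      have : (c :: cs) ++ [r] = c :: (cs ++ [r]) := by simp
      rw [this, ih groups c (cs ++ [r])]
      -- align right-hand sides
      have hl2 : (c :: (cs ++ [r])).getLast (List.cons_ne_nil _ _) = r := by
        simp
      rw [hl2]
      have htg : pvTakeGroup max_gap max_batch (pvKey c) (pvKey ((c :: cs).getLast (List.cons_ne_nil c cs))) (r :: tl)
          = (r :: (pvTakeGroup max_gap max_batch (pvKey c) (pvKey r) tl).1,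
             (pvTakeGroup max_gap max_batch (pvKey c) (pvKey r) tl).2) := by
        simp only [pvTakeGroup]
        rw [if_neg]
        omega
      rw [htg]
      simp
    · -- close the group, start a new one at r
      have hif : (if pvKey r - pvKey (PySem.List.pyGetD (c :: cs) (-1) []) ≤ max_gap ∧
            pvKey r - pvKey (PySem.List.pyGetD (c :: cs) 0 []) + 1 ≤ max_batch then
            (groups, (c :: cs) ++ [r]) else (groups ++ [c :: cs], [r]))
          = (groups ++ [c :: cs], [r]) := by
        rw [hlast, hhead]; exact if_neg hcond
      simp only [hif]
      rw [ih (groups ++ [c :: cs]) r []]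
      have htg : pvTakeGroup max_gap max_batch (pvKey c) (pvKey ((c :: cs).getLast (List.cons_ne_nil c cs))) (r :: tl)
          = ([], r :: tl) := by
        simp only [pvTakeGroup]
        rw [if_pos]
        omega
      rw [htg]
      have hch : pvChunks max_gap max_batch (r :: tl)
          = (r :: (pvTakeGroup max_gap max_batch (pvKey r) (pvKey r) tl).1) ::
            pvChunks max_gap max_batch (pvTakeGroup max_gap max_batch (pvKey r) (pvKey r) tl).2 := by
        simp [pvChunks]
      simp [hch, List.getLast]

-- ===== VERDICT (by name: the statement is the Claim_ definition above) =====
theorem group_registers_spec : Claim_equal_group_registers := by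
  intro registers max_gap max_batch _ _
  unfold Spec_group_registers group_registers group_registers_alt
  by_cases hemp : registers.isEmpty
  · have : registers = [] := List.isEmpty_iff.mp hemp
    subst this
    simp [PySem.List.sorted, pvChunks]
  · rw [if_neg hemp]
    have hne : registers ≠ [] := fun h => hemp (by simp [h])
    have hsne : PySem.List.sorted registers (fun r => pvKey r) false ≠ [] := by
      intro h
      have := PySem.List.sorted_perm (xs := registers) (key := fun r => pvKey r) (rev := false)
      rw [h] at this
      exact hne (this.nil_eq).symm
    obtain ⟨r0, rest, hsrt⟩ := List.exists_cons_of_ne_nil hsne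
    simp only [hsrt]
    have h0 : (PySem.List.pyGet? (r0 :: rest) 0).getD ([] : List (String × Int)) = r0 := by
      rw [PySem.List.pyGet?_zero_cons]
      rfl
    have h1 : PySem.List.slice (r0 :: rest) (some 1) none = rest := by
      rw [PySem.List.slice_from_one]
      rfl
    simp only [h0, h1]
    have := loopA_eq max_gap max_batch rest [] r0 []
    simp only [List.nil_append] at this
    rw [this]
    simp [pvChunks, List.getLast]
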